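-- pv_equiv track=rewrite | github.com/ttzytt/PyAutoGrade | tests/Block 4/tested_code/1462/Unit 1/math_functions_review.py | new_triangular_number
-- ===== SOURCE A (Python) =====
-- def new_triangular_number(n):
--     count = 1
--     result = 0
--
--     if n % 2 == 1:
--
--         while count <= (n + 1) / 2:
--             result = result + (2 * count) - 1
--             count = count + 1
--         return result
--
--     else:
--
--         while count <= n/2:
--             result = result + (2 * count)
--             count = count + 1
--         return result
-- ===== SOURCE B (Python) =====
-- def new_triangular_number(n):
--     # Closed form: sum of first k odd numbers = k^2 (odd n, k=(n+1)//2),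
--     # sum of first k even numbers = k*(k+1) (even n, k=n//2); 0 when k <= 0.
--     if n % 2 == 1:
--         k = (n + 1) // 2
--         return k * k if k > 0 else 0
--     else:
--         k = n // 2
--         return k * (k + 1) if k > 0 else 0
-- ===== Notes on version B (the rewrite author's own statement) =====
-- stated objective: faster
-- what changed: Replaces the O(n) accumulation loop with the closed forms k^2 (sum of first k odd numbers) and k(k+1) (sum of first k even numbers).
import Mathlib
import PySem

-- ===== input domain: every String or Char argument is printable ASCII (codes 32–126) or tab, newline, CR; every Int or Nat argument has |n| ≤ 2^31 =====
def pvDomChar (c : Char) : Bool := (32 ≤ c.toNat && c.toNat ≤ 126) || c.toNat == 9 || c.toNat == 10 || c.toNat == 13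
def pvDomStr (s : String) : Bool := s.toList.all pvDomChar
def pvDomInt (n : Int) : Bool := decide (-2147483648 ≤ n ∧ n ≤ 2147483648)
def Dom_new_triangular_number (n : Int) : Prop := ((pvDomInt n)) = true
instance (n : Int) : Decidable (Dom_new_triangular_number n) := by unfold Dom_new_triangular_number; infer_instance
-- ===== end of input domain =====

-- B replaces A's O(n) accumulation loops with the O(1) closed forms k^2 / k*(k+1).

-- ===== PORT A =====
-- A's odd-branch loop: while count <= (n+1)/2: result += 2*count - 1; count += 1.
-- Python's (n+1)/2 is true division, but n is odd there so it is the exact integer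
-- floordiv (n+1) 2; likewise n/2 in the even branch (n even). The bound is passed in.
def pvLoopOdd (bound count result : Int) : Int :=
  if count ≤ bound then pvLoopOdd bound (count + 1) (result + 2 * count - 1) else result
termination_by (bound + 1 - count).toNat
decreasing_by omega

def pvLoopEven (bound count result : Int) : Int :=
  if count ≤ bound then pvLoopEven bound (count + 1) (result + 2 * count) else result
termination_by (bound + 1 - count).toNat
decreasing_by omega

def new_triangular_number (n : Int) : Int :=
  if PySem.Int.mod n 2 = 1 then
    pvLoopOdd (PySem.Int.floordiv (n + 1) 2) 1 0
  else
    pvLoopEven (PySem.Int.floordiv n 2) 1 0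

-- ===== PORT B =====
def new_triangular_number_alt (n : Int) : Int :=
  if PySem.Int.mod n 2 = 1 then
    let k := PySem.Int.floordiv (n + 1) 2
    if k > 0 then k * k else 0
  else
    let k := PySem.Int.floordiv n 2
    if k > 0 then k * (k + 1) else 0

-- ===== PRECONDITION & SPEC =====
def Spec_new_triangular_number (n : Int) (out : Int) : Prop := out = new_triangular_number_alt n
instance (n : Int) (out : Int) : Decidable (Spec_new_triangular_number n out) := by unfold Spec_new_triangular_number; infer_instance

-- ===== CLAIM (what is proved, stated in full; the proofs are below) =====
def Claim_equal_new_triangular_number : Prop := ∀ (n : Int), Dom_new_triangular_number n → Spec_new_triangular_number n (new_triangular_number n)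

-- ===== LEMMAS AND PROOFS =====
theorem pvLoopOdd_eq (b c r : Int) :
    pvLoopOdd b c r = if c ≤ b then r + b * b - (c - 1) * (c - 1) else r := by
  rw [pvLoopOdd]
  split_ifs with h
  · rw [pvLoopOdd_eq]
    split_ifs with h2
    · ring
    · have : c = b := by omega
      subst this; ring
  · rfl
termination_by (b + 1 - c).toNat
decreasing_by omega

theorem pvLoopEven_eq (b c r : Int) :
    pvLoopEven b c r = if c ≤ b then r + b * (b + 1) - (c - 1) * c else r := by
  rw [pvLoopEven]
  split_ifs with h
  · rw [pvLoopEven_eq]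
    split_ifs with h2
    · ring
    · have : c = b := by omega
      subst this; ring
  · rfl
termination_by (b + 1 - c).toNat
decreasing_by omega

-- ===== VERDICT (by name: the statement is the Claim_ definition above) =====
theorem new_triangular_number_spec : Claim_equal_new_triangular_number := by
  intro n _
  unfold Spec_new_triangular_number new_triangular_number new_triangular_number_alt
  split_ifs with h
  · rw [pvLoopOdd_eq]
    set k := PySem.Int.floordiv (n + 1) 2 with hk
    split_ifs with h1 <;> try ring_nf
    all_goals omega
  · rw [pvLoopEven_eq]
    set k := PySem.Int.floordiv n 2 with hk
    split_ifs with h1 <;> try ring_nf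
    all_goals omega
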